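-- pv_equiv track=rewrite | github.com/eugeniosergio72/Shann_Fano | Shanon-fano.py | criar_tabela
-- ===== SOURCE A (Python) =====
-- def criar_tabela(probabilidades):
--     simbolos_ordenados = sorted(probabilidades.keys(), key=lambda simbolo: probabilidades[simbolo], reverse=True)
--     tabela = {}
--
--     def construir_tabela(simbolos):
--         if len(simbolos) == 1:
--             return
--
--         meio = len(simbolos) // 2
--         for simbolo in simbolos[:meio]:
--             tabela[simbolo] = tabela.get(simbolo, '') + '0'
--         for simbolo in simbolos[meio:]:
--             tabela[simbolo] = tabela.get(simbolo, '') + '1'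
--
--         construir_tabela(simbolos[:meio])
--         construir_tabela(simbolos[meio:])
--
--     construir_tabela(simbolos_ordenados)
--     return tabela
-- ===== SOURCE B (Python) =====
-- def criar_tabela(probabilidades):
--     ordenados = sorted(probabilidades.keys(), key=lambda simbolo: probabilidades[simbolo], reverse=True)
--     n = len(ordenados)
--     if n == 1:
--         return {}
--     tabela = {}
--     for i, simbolo in enumerate(ordenados):
--         lo, hi = 0, n
--         bits = []
--         while hi - lo > 1:
--             meio = lo + (hi - lo) // 2
--             if i < meio:
--                 bits.append('0')
--                 hi = meio
--             else:
--                 bits.append('1')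
--                 lo = meio
--         tabela[simbolo] = ''.join(bits)
--     return tabela
-- ===== Notes on version B (the rewrite author's own statement) =====
-- stated objective: alternative
-- what changed: B computes every symbol's code independently by binary-narrowing the symbol's index inside [0, n) (a per-symbol while loop collecting bits), instead of A's recursive splitting of the sorted list that appends one bit per level to each entry of a shared dict.
import Mathlib
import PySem

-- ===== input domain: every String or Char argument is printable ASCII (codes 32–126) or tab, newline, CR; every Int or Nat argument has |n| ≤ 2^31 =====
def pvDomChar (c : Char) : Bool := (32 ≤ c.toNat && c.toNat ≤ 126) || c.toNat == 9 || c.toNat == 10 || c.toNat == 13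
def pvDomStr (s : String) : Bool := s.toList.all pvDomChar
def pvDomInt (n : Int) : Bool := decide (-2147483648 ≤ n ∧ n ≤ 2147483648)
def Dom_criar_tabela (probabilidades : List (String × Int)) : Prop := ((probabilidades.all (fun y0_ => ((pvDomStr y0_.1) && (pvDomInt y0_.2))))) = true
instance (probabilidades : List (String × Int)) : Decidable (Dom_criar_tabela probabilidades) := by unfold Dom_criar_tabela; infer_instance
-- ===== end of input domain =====

-- B computes every symbol's code independently by binary-narrowing the symbol's index
-- inside [0, n) (a per-symbol while loop collecting bits), instead of A's recursive
-- splitting of the sorted list that appends one bit per level to a shared dict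
-- (objective: alternative).

-- ===== PORT A =====
-- construir_tabela(simbolos) mutating the shared dict 'tabela'; here the dict is threaded.
-- The 'simbolos = []' branch is a totality guard only: Python recurses forever there
-- (RecursionError), and Pre_criar_tabela excludes that input.
def construir_tabela (simbolos : List String) (tabela : PySem.Dict String String) :
    PySem.Dict String String :=
  if _h1 : simbolos.length = 1 then tabela
  else if _h0 : simbolos = [] then tabela
  else
    let meio : Nat := simbolos.length / 2   -- len(simbolos) // 2 : floor division on a Nat length
    let t1 := (PySem.List.slice simbolos none (some (meio : Int))).foldl
      (fun t simbolo => t.insert simbolo (t.getD simbolo "" ++ "0")) tabela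
    let t2 := (PySem.List.slice simbolos (some (meio : Int)) none).foldl
      (fun t simbolo => t.insert simbolo (t.getD simbolo "" ++ "1")) t1
    construir_tabela (PySem.List.slice simbolos (some (meio : Int)) none)
      (construir_tabela (PySem.List.slice simbolos none (some (meio : Int))) t2)
termination_by simbolos.length
decreasing_by
  · rw [PySem.List.slice_to_natCast]
    simp only [List.length_take]
    have h2 : simbolos.length ≠ 0 := fun h => _h0 (List.eq_nil_of_length_eq_zero h)
    omega
  · rw [PySem.List.slice_from_natCast]
    simp only [List.length_drop]
    have h2 : simbolos.length ≠ 0 := fun h => _h0 (List.eq_nil_of_length_eq_zero h)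
    omega

def criar_tabela (probabilidades : List (String × Int)) : List (String × String) :=
  let probs := PySem.Dict.ofList probabilidades
  -- probabilidades[simbolo]: simbolo ranges over probs.keys, so the key is present and getD is exact
  let simbolos_ordenados := PySem.List.sorted probs.keys (fun simbolo => probs.getD simbolo 0) true
  (construir_tabela simbolos_ordenados PySem.Dict.empty).items

-- ===== PORT B =====
-- the per-symbol while loop 'while hi - lo > 1: …' collecting the bits list
def bitsOf (lo hi i : Int) : List String :=
  if _h : hi - lo > 1 then
    let meio := lo + PySem.Int.floordiv (hi - lo) 2
    if i < meio then "0" :: bitsOf lo meio i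
    else "1" :: bitsOf meio hi i
  else []
termination_by (hi - lo).toNat
decreasing_by
  · have := PySem.Int.floordiv_eq_ediv_of_pos (a := hi - lo) (b := 2) (by omega)
    simp only [this]
    omega
  · have := PySem.Int.floordiv_eq_ediv_of_pos (a := hi - lo) (b := 2) (by omega)
    simp only [this]
    omega

-- the 'for i, simbolo in enumerate(ordenados): tabela[simbolo] = ''.join(bits)' loop:
-- a fold over enumerate inserting each symbol's finished code into the dict
def criar_tabela_alt (probabilidades : List (String × Int)) : List (String × String) :=
  let probs := PySem.Dict.ofList probabilidades
  let ordenados := PySem.List.sorted probs.keys (fun simbolo => probs.getD simbolo 0) true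
  let n := ordenados.length
  if n = 1 then []
  else
    ((PySem.List.enumerate ordenados).foldl
      (fun tabela q => tabela.insert q.2 (PySem.Str.join "" (bitsOf 0 (n : Int) q.1)))
      PySem.Dict.empty).items

-- ===== PRECONDITION & SPEC =====
-- Pre_ excludes only the empty dict, on which A's recursion never terminates (RecursionError).
def Pre_criar_tabela (probabilidades : List (String × Int)) : Prop := probabilidades ≠ []
instance (probabilidades : List (String × Int)) : Decidable (Pre_criar_tabela probabilidades) := by
  unfold Pre_criar_tabela; infer_instance

def pvWitness_criar_tabela : (List (String × Int)) := [("a", 5), ("b", 2), ("c", 1)]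

def Spec_criar_tabela (probabilidades : List (String × Int)) (out : List (String × String)) : Prop := out = criar_tabela_alt probabilidades
instance (probabilidades : List (String × Int)) (out : List (String × String)) : Decidable (Spec_criar_tabela probabilidades out) := by unfold Spec_criar_tabela; infer_instance

-- ===== CLAIM (what is proved, stated in full; the proofs are below) =====
def Claim_equal_criar_tabela : Prop := ∀ (probabilidades : List (String × Int)), Dom_criar_tabela probabilidades → Pre_criar_tabela probabilidades → Spec_criar_tabela probabilidades (criar_tabela probabilidades)

-- ===== LEMMAS AND PROOFS =====

-- proof-side description of A's result: the Shannon–Fano sub-table of the segment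
-- 'simbolos' under prefix 'prefixo', built by recursive splitting
def pvCodes (simbolos : List String) (prefixo : String) : List (String × String) :=
  if _h1 : simbolos.length = 1 then
    if prefixo ≠ "" then [(simbolos.headI, prefixo)] else []
  else if _h0 : simbolos = [] then []
  else
    let meio : Nat := simbolos.length / 2
    pvCodes (PySem.List.slice simbolos none (some (meio : Int))) (prefixo ++ "0") ++
      pvCodes (PySem.List.slice simbolos (some (meio : Int)) none) (prefixo ++ "1")
termination_by simbolos.length
decreasing_by
  · rw [PySem.List.slice_to_natCast]
    simp only [List.length_take]
    have h2 : simbolos.length ≠ 0 := fun h => _h0 (List.eq_nil_of_length_eq_zero h)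
    omega
  · rw [PySem.List.slice_from_natCast]
    simp only [List.length_drop]
    have h2 : simbolos.length ≠ 0 := fun h => _h0 (List.eq_nil_of_length_eq_zero h)
    omega

-- first-match lookup in an association list (plain equality, for reasoning about dict items)
def pvLook (k : String) : List (String × String) → Option String
  | [] => none
  | (j, w) :: c => if j = k then some w else pvLook k c

-- apply a code table 'c' to an items list: overwrite the value of every key that c knows
def pvApply (c : List (String × String)) (items : List (String × String)) : List (String × String) :=
  items.map fun kv => match pvLook kv.1 c with | some w => (kv.1, w) | none => kv

theorem pvLook_eq_none (k : String) (c : List (String × String)) (h : k ∉ c.map Prod.fst) :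
    pvLook k c = none := by
  induction c with
  | nil => rfl
  | cons kv c ih =>
    obtain ⟨j, w⟩ := kv
    simp only [List.map_cons, List.mem_cons] at h
    have hj : ¬ j = k := fun hj => h (Or.inl hj.symm)
    simp only [pvLook, if_neg hj]
    exact ih fun hm => h (Or.inr hm)

theorem pvLook_map_const (k : String) (ks : List String) (w : String) (h : k ∈ ks) :
    pvLook k (ks.map fun j => (j, w)) = some w := by
  induction ks with
  | nil => cases h
  | cons j ks ih =>
    simp only [List.map_cons, pvLook]
    rcases List.mem_cons.mp h with h | h
    · simp [h]
    · by_cases hj : j = k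
      · simp [hj]
      · simp [hj, ih h]

theorem pvLook_append (k : String) (c1 c2 : List (String × String)) :
    pvLook k (c1 ++ c2) = (pvLook k c1).or (pvLook k c2) := by
  induction c1 with
  | nil => rfl
  | cons kv c ih =>
    obtain ⟨j, w⟩ := kv
    by_cases hj : j = k <;> simp [pvLook, hj, ih]

theorem pvApply_nil (items : List (String × String)) : pvApply [] items = items := by
  simp [pvApply, pvLook]

theorem pvApply_keys (c items : List (String × String)) :
    (pvApply c items).map Prod.fst = items.map Prod.fst := by
  simp only [pvApply, List.map_map]
  refine List.map_congr_left fun kv _ => ?_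
  cases h : pvLook kv.1 c <;> simp [h]

theorem pvApply_comp_disjoint (c1 c2 items : List (String × String))
    (h : ∀ k, k ∈ c1.map Prod.fst → k ∉ c2.map Prod.fst) :
    pvApply c2 (pvApply c1 items) = pvApply (c1 ++ c2) items := by
  simp only [pvApply, List.map_map]
  refine List.map_congr_left fun kv _ => ?_
  simp only [Function.comp_apply, pvLook_append]
  cases h1 : pvLook kv.1 c1 with
  | none => simp
  | some w =>
    have hk1 : kv.1 ∈ c1.map Prod.fst := by
      by_contra hk
      rw [pvLook_eq_none _ _ hk] at h1; cases h1
    have h2 : pvLook kv.1 c2 = none := pvLook_eq_none _ _ (h _ hk1)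
    simp [h2]

theorem pvLook_ne_none (k : String) (c : List (String × String)) (h : k ∈ c.map Prod.fst) :
    pvLook k c ≠ none := by
  induction c with
  | nil => cases h
  | cons kv c ih =>
    obtain ⟨j, w⟩ := kv
    by_cases hj : j = k
    · simp [pvLook, hj]
    · simp only [List.map_cons, List.mem_cons] at h
      rcases h with h | h
      · exact absurd h.symm hj
      · simpa [pvLook, hj] using ih h

theorem pvApply_shadow (c1 c2 items : List (String × String))
    (h : ∀ k, k ∈ c1.map Prod.fst → k ∈ c2.map Prod.fst) :
    pvApply c2 (pvApply c1 items) = pvApply c2 items := by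
  simp only [pvApply, List.map_map]
  refine List.map_congr_left fun kv _ => ?_
  simp only [Function.comp_apply]
  cases h1 : pvLook kv.1 c1 with
  | none => simp
  | some w =>
    have hk1 : kv.1 ∈ c1.map Prod.fst := by
      by_contra hk
      rw [pvLook_eq_none _ _ hk] at h1; cases h1
    cases h2 : pvLook kv.1 c2 with
    | none => exact absurd h2 (pvLook_ne_none _ _ (h _ hk1))
    | some w2 => simp

theorem get?_mk_eq_pvLook (items : List (String × String)) (k : String) :
    (PySem.Dict.mk items).get? k = pvLook k items := by
  induction items with
  | nil => rfl
  | cons kv rest ih =>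
    obtain ⟨j, w⟩ := kv
    rw [PySem.Dict.get?_mk_cons]
    simp only [pvLook, beq_iff_eq]
    split <;> simp_all

theorem pvLook_pvApply (k : String) (c items : List (String × String)) :
    pvLook k (pvApply c items) =
      (pvLook k items).map fun v => match pvLook k c with | some w => w | none => v := by
  induction items with
  | nil => rfl
  | cons kv rest ih =>
    obtain ⟨j, w⟩ := kv
    by_cases hj : j = k
    · subst hj
      cases hc : pvLook j c <;> simp [pvApply, pvLook, hc]
    · cases hc : pvLook j c <;> simp [pvApply, pvLook, hj, hc] <;> simpa [pvApply] using ih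

theorem get?_eq_pvLook (t : PySem.Dict String String) (k : String) :
    t.get? k = pvLook k t.items := get?_mk_eq_pvLook t.items k

theorem mk_keys (l : List (String × String)) :
    (PySem.Dict.mk l : PySem.Dict String String).keys = l.map Prod.fst := rfl

theorem pvApply_append_arg (c x y : List (String × String)) :
    pvApply c (x ++ y) = pvApply c x ++ pvApply c y := by simp [pvApply]

theorem pvApply_congr_keys (c c' items : List (String × String))
    (h : ∀ k ∈ items.map Prod.fst, pvLook k c = pvLook k c') :
    pvApply c items = pvApply c' items := by
  unfold pvApply
  refine List.map_congr_left fun kv hm => ?_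
  rw [h kv.1 (List.mem_map_of_mem hm)]

theorem pvApply_disj (c items : List (String × String))
    (h : ∀ kk ∈ items.map Prod.fst, pvLook kk c = none) : pvApply c items = items := by
  have : pvApply c items = pvApply [] items := pvApply_congr_keys _ _ _ fun k hk => by
    rw [h k hk]; rfl
  rw [this, pvApply_nil]

theorem pvApply_id (k p : String) (items : List (String × String))
    (hnd : (items.map Prod.fst).Nodup) (hget : pvLook k items = some p) :
    pvApply [(k, p)] items = items := by
  induction items with
  | nil => cases hget
  | cons kv rest ih =>
    obtain ⟨j, w⟩ := kv
    simp only [List.map_cons, List.nodup_cons] at hnd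
    by_cases hj : j = k
    · subst hj
      have hw : w = p := by simpa [pvLook] using hget
      subst hw
      have htail : pvApply [(j, w)] rest = rest := by
        refine pvApply_disj _ _ fun kk hk => ?_
        have hne : ¬ j = kk := fun hjk => hnd.1 (hjk ▸ hk)
        simp [pvLook, hne]
      simpa [pvApply, pvLook] using htail
    · have hget' : pvLook k rest = some p := by simpa [pvLook, hj] using hget
      have htail := ih hnd.2 hget'
      have hk : ¬ k = j := fun h => hj h.symm
      simpa [pvApply, pvLook, hk] using htail

theorem foldl_insert_present (bit p : String) (ks : List String) (t : PySem.Dict String String)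
    (hnd : ks.Nodup) (htnd : t.keys.Nodup) (hget : ∀ k ∈ ks, t.get? k = some p) :
    ks.foldl (fun t s => t.insert s (t.getD s "" ++ bit)) t =
      PySem.Dict.mk (pvApply (ks.map fun k => (k, p ++ bit)) t.items) := by
  induction ks generalizing t with
  | nil => simp [pvApply_nil]
  | cons k ks ih =>
    simp only [List.nodup_cons] at hnd
    have hgk : t.get? k = some p := hget k (List.mem_cons_self ..)
    have hc : t.contains k = true := by
      rw [PySem.Dict.contains_eq_isSome_get?, hgk]; rfl
    have hv : t.getD k "" = p := by
      rw [PySem.Dict.getD_eq_get?_getD, hgk]; rfl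
    simp only [List.foldl_cons, hv]
    have hitems : (t.insert k (p ++ bit)).items = pvApply [(k, p ++ bit)] t.items := by
      rw [PySem.Dict.items_insert_of_contains t _ hc]
      unfold pvApply
      refine List.map_congr_left fun q _ => ?_
      by_cases hq : q.1 = k
      · simp [pvLook, hq]
      · have hq' : ¬ k = q.1 := fun h => hq h.symm
        simp [pvLook, hq, hq']
    have hkeys : (t.insert k (p ++ bit)).keys = t.keys := by
      show ((t.insert k (p ++ bit)).items).map Prod.fst = t.items.map Prod.fst
      rw [hitems, pvApply_keys]
    have ih' := ih (t.insert k (p ++ bit)) hnd.2 (by rw [hkeys]; exact htnd)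
      (fun j hj => by
        have hne : j ≠ k := fun h => hnd.1 (by rw [← h]; exact hj)
        rw [PySem.Dict.get?_insert_of_ne _ _ hne]
        exact hget j (List.mem_cons_of_mem _ hj))
    rw [ih', hitems, pvApply_comp_disjoint]
    · simp
    · intro kk hk1 hk2
      simp only [List.map_cons, List.map_nil, List.mem_singleton] at hk1
      have hkks : kk ∈ ks := by
        simp only [List.map_map] at hk2
        simpa using hk2
      rw [hk1] at hkks
      exact hnd.1 hkks

theorem foldl_insert_fresh (bit : String) (ks : List String) (t : PySem.Dict String String)
    (hnd : ks.Nodup) (hfr : ∀ k ∈ ks, t.contains k = false) :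
    ks.foldl (fun t s => t.insert s (t.getD s "" ++ bit)) t =
      PySem.Dict.mk (t.items ++ ks.map fun k => (k, bit)) := by
  induction ks generalizing t with
  | nil => simp
  | cons k ks ih =>
    simp only [List.nodup_cons] at hnd
    have hc : t.contains k = false := hfr k (List.mem_cons_self ..)
    have hv : t.getD k "" = "" := PySem.Dict.getD_of_not_contains t "" hc
    simp only [List.foldl_cons, hv]
    have hitems : (t.insert k ("" ++ bit)).items = t.items ++ [(k, bit)] := by
      rw [PySem.Dict.items_insert_of_not_contains t _ hc]; rfl
    have ih' := ih (t.insert k ("" ++ bit)) hnd.2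
      (fun j hj => by
        rw [PySem.Dict.contains_insert]
        have hjk : (j == k) = false := by
          simp only [beq_eq_false_iff_ne, ne_eq]
          exact fun h => hnd.1 (h ▸ hj)
        rw [hjk, hfr j (List.mem_cons_of_mem _ hj)]; rfl)
    rw [ih', hitems]
    simp

theorem keys_pvCodes (n : Nat) (s : List String) (p : String)
    (hn : s.length ≤ n) (hne : s ≠ []) (hp : p ≠ "") :
    (pvCodes s p).map Prod.fst = s := by
  induction n generalizing s p with
  | zero =>
    exfalso
    exact hne (List.eq_nil_of_length_eq_zero (Nat.le_zero.mp hn))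
  | succ n ih =>
    by_cases h1 : s.length = 1
    · obtain ⟨x, rfl⟩ := List.length_eq_one_iff.mp h1
      rw [pvCodes, dif_pos h1, if_pos hp]
      rfl
    · have hl0 : s.length ≠ 0 := fun h => hne (List.eq_nil_of_length_eq_zero h)
      have h2 : 2 ≤ s.length := by omega
      rw [pvCodes, dif_neg h1, dif_neg hne]
      simp only [PySem.List.slice_to_natCast, PySem.List.slice_from_natCast]
      have hm1 : 1 ≤ s.length / 2 := by omega
      have hm2 : s.length / 2 < s.length := by omega
      rw [List.map_append,
        ih (s.take (s.length / 2)) (p ++ "0")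
          (by rw [List.length_take]; omega)
          (by apply List.ne_nil_of_length_pos; rw [List.length_take]; omega)
          (by simp),
        ih (s.drop (s.length / 2)) (p ++ "1")
          (by rw [List.length_drop]; omega)
          (by apply List.ne_nil_of_length_pos; rw [List.length_drop]; omega)
          (by simp)]
      exact List.take_append_drop _ s

theorem pvApply_reconstruct (c : List (String × String)) (w0 : String)
    (hnd : (c.map Prod.fst).Nodup) :
    pvApply c ((c.map Prod.fst).map fun k => (k, w0)) = c := by
  induction c with
  | nil => rfl
  | cons kv c ih =>
    obtain ⟨k0, w0c⟩ := kv
    simp only [List.map_cons, List.nodup_cons] at hnd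
    have hhead : pvLook k0 ((k0, w0c) :: c) = some w0c := by simp [pvLook]
    have htail : pvApply ((k0, w0c) :: c) ((c.map Prod.fst).map fun k => (k, w0)) =
        pvApply c ((c.map Prod.fst).map fun k => (k, w0)) := by
      refine pvApply_congr_keys _ _ _ fun k hk => ?_
      simp only [List.map_map] at hk
      have hk' : k ∈ c.map Prod.fst := by simpa using hk
      have hne : ¬ k0 = k := fun h => hnd.1 (h ▸ hk')
      simp [pvLook, hne]
    simp only [List.map_cons]
    show pvApply ((k0, w0c) :: c) ((k0, w0) :: (c.map Prod.fst).map fun k => (k, w0)) = _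
    unfold pvApply
    simp only [List.map_cons, hhead]
    refine congrArg₂ _ rfl ?_
    have := htail.trans (ih hnd.2)
    simpa [pvApply] using this

theorem construir_eq (n : Nat) (s : List String) (t : PySem.Dict String String) (p : String)
    (hn : s.length ≤ n) (hne : s ≠ []) (hnd : s.Nodup) (htnd : t.keys.Nodup)
    (hget : ∀ k ∈ s, t.get? k = some p) :
    construir_tabela s t = PySem.Dict.mk (pvApply (pvCodes s p) t.items) := by
  induction n generalizing s t p with
  | zero => exact absurd (List.eq_nil_of_length_eq_zero (Nat.le_zero.mp hn)) hne
  | succ n ih =>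
    by_cases h1 : s.length = 1
    · rw [construir_tabela, dif_pos h1, pvCodes, dif_pos h1]
      by_cases hp : p = ""
      · subst hp
        rw [if_neg (by simp), pvApply_nil]
      · rw [if_pos hp]
        obtain ⟨x, rfl⟩ := List.length_eq_one_iff.mp h1
        have hx : pvLook x t.items = some p := by
          rw [← get?_eq_pvLook]; exact hget x (by simp)
        show t = PySem.Dict.mk (pvApply [(x, p)] t.items)
        rw [pvApply_id x p t.items htnd hx]
    · have hl0 : s.length ≠ 0 := fun h => hne (List.eq_nil_of_length_eq_zero h)
      have h2 : 2 ≤ s.length := by omega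
      rw [construir_tabela, dif_neg h1, dif_neg hne, pvCodes, dif_neg h1, dif_neg hne]
      simp only [PySem.List.slice_to_natCast, PySem.List.slice_from_natCast]
      set m := s.length / 2 with hm
      have hm1 : 1 ≤ m := by omega
      have hm2 : m < s.length := by omega
      have hta : (s.take m).length = m := by rw [List.length_take]; omega
      have htb : (s.drop m).length = s.length - m := List.length_drop
      have hsplit : s.take m ++ s.drop m = s := List.take_append_drop m s
      have hnea : s.take m ≠ [] := by apply List.ne_nil_of_length_pos; omega
      have hneb : s.drop m ≠ [] := by apply List.ne_nil_of_length_pos; omega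
      have hndab : (s.take m ++ s.drop m).Nodup := by rw [hsplit]; exact hnd
      have hnda : (s.take m).Nodup := (List.nodup_append.mp hndab).1
      have hndb : (s.drop m).Nodup := (List.nodup_append.mp hndab).2.1
      have hdisj : ∀ k ∈ s.take m, k ∉ s.drop m := fun k hk hk2 =>
        (List.nodup_append.mp hndab).2.2 k hk k hk2 rfl
      have hgeta : ∀ k ∈ s.take m, t.get? k = some p := fun k hk =>
        hget k (by rw [← hsplit]; exact List.mem_append_left _ hk)
      have hgetb : ∀ k ∈ s.drop m, t.get? k = some p := fun k hk =>
        hget k (by rw [← hsplit]; exact List.mem_append_right _ hk)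
      set aM := (s.take m).map (fun k => (k, p ++ "0")) with haM
      set bM := (s.drop m).map (fun k => (k, p ++ "1")) with hbM
      have haMk : aM.map Prod.fst = s.take m := by
        rw [haM, List.map_map, show Prod.fst ∘ (fun k : String => (k, p ++ "0")) = id from rfl,
          List.map_id]
      have hbMk : bM.map Prod.fst = s.drop m := by
        rw [hbM, List.map_map, show Prod.fst ∘ (fun k : String => (k, p ++ "1")) = id from rfl,
          List.map_id]
      -- the two bit-appending passes over keys already present in t
      rw [foldl_insert_present "0" p (s.take m) t hnda htnd hgeta]
      have hk1 : (PySem.Dict.mk (pvApply aM t.items)).keys.Nodup := by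
        rw [mk_keys, pvApply_keys]; exact htnd
      have hget1 : ∀ k ∈ s.drop m, (PySem.Dict.mk (pvApply aM t.items)).get? k = some p := by
        intro k hk
        rw [get?_eq_pvLook]
        show pvLook k (pvApply aM t.items) = some p
        rw [pvLook_pvApply, pvLook_eq_none k aM (by rw [haMk]; exact fun hmem => hdisj k hmem hk)]
        have := hgetb k hk
        rw [get?_eq_pvLook] at this
        rw [this]
        rfl
      rw [foldl_insert_present "1" p (s.drop m) _ hndb hk1 hget1]
      rw [pvApply_comp_disjoint aM bM t.items
        (by rw [haMk, hbMk]; exact hdisj)]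
      -- codes of the two halves
      set LA := pvCodes (s.take m) (p ++ "0") with hLA
      set LB := pvCodes (s.drop m) (p ++ "1") with hLB
      have hLAk : LA.map Prod.fst = s.take m :=
        keys_pvCodes (s.take m).length _ _ le_rfl hnea (by simp)
      have hLBk : LB.map Prod.fst = s.drop m :=
        keys_pvCodes (s.drop m).length _ _ le_rfl hneb (by simp)
      -- look-ups inside the combined bit table
      have hlookA : ∀ k ∈ s.take m, pvLook k (aM ++ bM) = some (p ++ "0") := by
        intro k hk
        rw [pvLook_append, haM, pvLook_map_const k _ _ hk]; rfl
      have hlookB : ∀ k ∈ s.drop m, pvLook k (aM ++ bM) = some (p ++ "1") := by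
        intro k hk
        rw [pvLook_append, pvLook_eq_none k aM (by rw [haMk]; exact fun hmem => hdisj k hmem hk),
          hbM, pvLook_map_const k _ _ hk]
        rfl
      -- recursive call on the first half
      have hIHa := ih (s.take m) (PySem.Dict.mk (pvApply (aM ++ bM) t.items)) (p ++ "0")
        (by omega) hnea hnda
        (by rw [mk_keys, pvApply_keys]; exact htnd)
        (by
          intro k hk
          rw [get?_eq_pvLook]
          show pvLook k (pvApply (aM ++ bM) t.items) = some (p ++ "0")
          rw [pvLook_pvApply, hlookA k hk]
          have := hgeta k hk
          rw [get?_eq_pvLook] at this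
          rw [this]
          rfl)
      rw [hIHa, ← hLA]
      -- recursive call on the second half
      have hIHb := ih (s.drop m) (PySem.Dict.mk (pvApply LA (pvApply (aM ++ bM) t.items))) (p ++ "1")
        (by omega) hneb hndb
        (by rw [mk_keys, pvApply_keys, pvApply_keys]; exact htnd)
        (by
          intro k hk
          rw [get?_eq_pvLook]
          show pvLook k (pvApply LA (pvApply (aM ++ bM) t.items)) = some (p ++ "1")
          rw [pvLook_pvApply, pvLook_eq_none k LA (by rw [hLAk]; exact fun hmem => hdisj k hmem hk)]
          rw [pvLook_pvApply, hlookB k hk]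
          have := hgetb k hk
          rw [get?_eq_pvLook] at this
          rw [this]
          rfl)
      rw [hIHb, ← hLB]
      rw [pvApply_comp_disjoint LA LB _
        (by rw [hLAk, hLBk]; exact hdisj)]
      rw [pvApply_shadow (aM ++ bM) (LA ++ LB) t.items
        (by
          intro k hk
          rw [List.map_append, haMk, hbMk] at hk
          rw [List.map_append, hLAk, hLBk]
          exact hk)]

theorem keys_ofList_ne_nil (ps : List (String × Int)) (hne : ps ≠ []) :
    (PySem.Dict.ofList ps).keys ≠ [] := by
  have hins : ∀ (d : PySem.Dict String Int) (k : String) (v : Int), (d.insert k v).items ≠ [] := by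
    intro d k v
    by_cases hc : d.contains k
    · rw [PySem.Dict.items_insert_of_contains d v hc]
      intro hmap
      have hd : d.items = [] := List.map_eq_nil_iff.mp hmap
      simp [PySem.Dict.contains, hd] at hc
    · rw [PySem.Dict.items_insert_of_not_contains d v (Bool.not_eq_true _ ▸ hc)]
      simp
  have hstep : ∀ (qs : List (String × Int)) (d : PySem.Dict String Int),
      d.items ≠ [] → (d.update qs).items ≠ [] := by
    intro qs
    induction qs with
    | nil => intro d h; exact h
    | cons q qs ihq =>
      intro d h
      show ((d.insert q.1 q.2).update qs).items ≠ []
      exact ihq _ (hins d q.1 q.2)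
  obtain ⟨q, qs, rfl⟩ := List.exists_cons_of_ne_nil hne
  have : ((PySem.Dict.empty.insert q.1 q.2).update qs).items ≠ [] :=
    hstep qs _ (hins _ q.1 q.2)
  show ((PySem.Dict.ofList (q :: qs)).items.map (fun x => x.1)) ≠ []
  intro hmap
  exact this (by simpa [PySem.Dict.ofList, PySem.Dict.update] using List.map_eq_nil_iff.mp hmap)

-- ''.join over a cons is plain concatenation
theorem pvJoin0 (a : String) (l : List String) :
    PySem.Str.join "" (a :: l) = a ++ PySem.Str.join "" l := by
  cases l with
  | nil => simp [PySem.Str.join, PySem.Chars.join_singleton, PySem.Chars.join_nil]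
  | cons b r => simp [PySem.Str.join, PySem.Chars.join_cons_cons]

-- the recursive split table equals the per-index bit paths over the segment [lo, hi)
theorem pvCodes_eq_map (n : Nat) (s : List String) (p : String) (lo hi : Int)
    (hn : s.length ≤ n) (hlen : (s.length : Int) = hi - lo) (hne : s ≠ [])
    (hp : p ≠ "" ∨ 2 ≤ s.length) :
    pvCodes s p = (PySem.List.enumerate s lo).map
      (fun q => (q.2, p ++ PySem.Str.join "" (bitsOf lo hi q.1))) := by
  induction n generalizing s p lo hi with
  | zero => exact absurd (List.eq_nil_of_length_eq_zero (Nat.le_zero.mp hn)) hne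
  | succ n ih =>
    by_cases h1 : s.length = 1
    · obtain ⟨x, rfl⟩ := List.length_eq_one_iff.mp h1
      have hp' : p ≠ "" := by
        rcases hp with hp | hp
        · exact hp
        · simp at hp
      rw [pvCodes, dif_pos h1, if_pos hp']
      have hhl : ¬ hi - lo > 1 := by
        simp only [List.length_cons, List.length_nil] at hlen
        omega
      have hb : bitsOf lo hi lo = [] := by rw [bitsOf, dif_neg hhl]
      simp only [PySem.List.enumerate_cons, PySem.List.enumerate_nil, List.map_cons,
        List.map_nil, hb]
      simp [PySem.Str.join, PySem.Chars.join_nil]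
    · have hl0 : s.length ≠ 0 := fun h => hne (List.eq_nil_of_length_eq_zero h)
      have h2 : 2 ≤ s.length := by omega
      rw [pvCodes, dif_neg h1, dif_neg hne]
      simp only [PySem.List.slice_to_natCast, PySem.List.slice_from_natCast]
      set m := s.length / 2 with hm
      have hm1 : 1 ≤ m := by omega
      have hm2 : m < s.length := by omega
      have hta : (s.take m).length = m := by rw [List.length_take]; omega
      have htb : (s.drop m).length = s.length - m := List.length_drop
      have hnea : s.take m ≠ [] := by apply List.ne_nil_of_length_pos; omega
      have hneb : s.drop m ≠ [] := by apply List.ne_nil_of_length_pos; omega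
      have hfd : PySem.Int.floordiv (hi - lo) 2 = (m : Int) := by
        rw [← hlen, PySem.Int.floordiv_eq_ediv_of_pos (by omega)]
        omega
      have hgt : hi - lo > 1 := by omega
      -- split the enumeration at the midpoint
      conv_rhs => rw [← List.take_append_drop m s]
      rw [PySem.List.enumerate_append, List.map_append, hta]
      -- first half: indices in [lo, lo + m)
      have e1 : pvCodes (s.take m) (p ++ "0") = (PySem.List.enumerate (s.take m) lo).map
          (fun q => (q.2, p ++ PySem.Str.join "" (bitsOf lo hi q.1))) := by
        rw [ih (s.take m) (p ++ "0") lo (lo + (m : Int)) (by omega)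
          (by rw [hta]; ring) hnea (Or.inl (by simp))]
        refine List.map_congr_left fun q hq => ?_
        obtain ⟨k, hk, rfl⟩ := (PySem.List.mem_enumerate_iff _ _ _).mp hq
        rw [hta] at hk
        have hb : bitsOf lo hi (lo + (k : Int)) =
            "0" :: bitsOf lo (lo + (m : Int)) (lo + (k : Int)) := by
          rw [bitsOf, dif_pos hgt]
          simp only [hfd]
          rw [if_pos (by omega)]
        rw [hb, pvJoin0]
        simp [String.append_assoc]
      -- second half: indices in [lo + m, hi)
      have e2 : pvCodes (s.drop m) (p ++ "1") = (PySem.List.enumerate (s.drop m) (lo + (m : Int))).map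
          (fun q => (q.2, p ++ PySem.Str.join "" (bitsOf lo hi q.1))) := by
        rw [ih (s.drop m) (p ++ "1") (lo + (m : Int)) hi (by omega)
          (by rw [htb]; omega) hneb (Or.inl (by simp))]
        refine List.map_congr_left fun q hq => ?_
        obtain ⟨k, hk, rfl⟩ := (PySem.List.mem_enumerate_iff _ _ _).mp hq
        rw [htb] at hk
        have hb : bitsOf lo hi (lo + (m : Int) + (k : Int)) =
            "1" :: bitsOf (lo + (m : Int)) hi (lo + (m : Int) + (k : Int)) := by
          rw [bitsOf, dif_pos hgt]
          simp only [hfd]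
          rw [if_neg (by omega)]
        rw [hb, pvJoin0]
        simp [String.append_assoc]
      rw [e1, e2]

-- top level of A: first split from the empty dict, then construir_eq on each half
theorem construir_top (s : List String) (hsnd : s.Nodup) (hsne : s ≠ []) (h1 : s.length ≠ 1) :
    (construir_tabela s PySem.Dict.empty).items = pvCodes s "" := by
  have hl0 : s.length ≠ 0 := fun h => hsne (List.eq_nil_of_length_eq_zero h)
  have h2 : 2 ≤ s.length := by omega
  rw [construir_tabela, dif_neg h1, dif_neg hsne, pvCodes, dif_neg h1, dif_neg hsne]
  simp only [PySem.List.slice_to_natCast, PySem.List.slice_from_natCast]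
  set m := s.length / 2 with hm
  have hm1 : 1 ≤ m := by omega
  have hm2 : m < s.length := by omega
  have hsplit : s.take m ++ s.drop m = s := List.take_append_drop m s
  have hnea : s.take m ≠ [] := by
    apply List.ne_nil_of_length_pos; rw [List.length_take]; omega
  have hneb : s.drop m ≠ [] := by
    apply List.ne_nil_of_length_pos; rw [List.length_drop]; omega
  have hndab : (s.take m ++ s.drop m).Nodup := by rw [hsplit]; exact hsnd
  have hnda : (s.take m).Nodup := (List.nodup_append.mp hndab).1
  have hndb : (s.drop m).Nodup := (List.nodup_append.mp hndab).2.1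
  have hdisj : ∀ k ∈ s.take m, k ∉ s.drop m := fun k hk hk2 =>
    (List.nodup_append.mp hndab).2.2 k hk k hk2 rfl
  set aM0 := (s.take m).map (fun k => (k, "0")) with haM0
  set bM1 := (s.drop m).map (fun k => (k, "1")) with hbM1
  have haM0k : aM0.map Prod.fst = s.take m := by
    rw [haM0, List.map_map, show Prod.fst ∘ (fun k : String => (k, "0")) = id from rfl,
      List.map_id]
  have hbM1k : bM1.map Prod.fst = s.drop m := by
    rw [hbM1, List.map_map, show Prod.fst ∘ (fun k : String => (k, "1")) = id from rfl,
      List.map_id]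
  -- first level: both passes insert fresh keys into the empty dict
  rw [foldl_insert_fresh "0" (s.take m) PySem.Dict.empty hnda
    (fun k _ => PySem.Dict.contains_empty k)]
  rw [show (PySem.Dict.empty : PySem.Dict String String).items = [] from rfl,
    List.nil_append]
  have hfr2 : ∀ k ∈ s.drop m, (PySem.Dict.mk aM0 : PySem.Dict String String).contains k = false := by
    intro k hk
    rw [PySem.Dict.contains_eq_decide_mem_keys]
    rw [mk_keys, haM0k]
    exact decide_eq_false fun hmem => hdisj k hmem hk
  rw [foldl_insert_fresh "1" (s.drop m) (PySem.Dict.mk aM0) hndb hfr2]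
  -- codes of the two halves
  set LA := pvCodes (s.take m) ("" ++ "0") with hLA
  set LB := pvCodes (s.drop m) ("" ++ "1") with hLB
  have hLAk : LA.map Prod.fst = s.take m :=
    keys_pvCodes (s.take m).length _ _ le_rfl hnea (by simp)
  have hLBk : LB.map Prod.fst = s.drop m :=
    keys_pvCodes (s.drop m).length _ _ le_rfl hneb (by simp)
  have hlookA : ∀ k ∈ s.take m, pvLook k (aM0 ++ bM1) = some "0" := by
    intro k hk
    rw [pvLook_append, haM0, pvLook_map_const k _ _ hk]
    rfl
  have hlookB : ∀ k ∈ s.drop m, pvLook k (aM0 ++ bM1) = some "1" := by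
    intro k hk
    rw [pvLook_append,
      pvLook_eq_none k aM0 (by rw [haM0k]; exact fun hmem => hdisj k hmem hk),
      hbM1, pvLook_map_const k _ _ hk]
    rfl
  -- the two recursive calls, through the characterisation lemma
  have hIa := construir_eq (s.take m).length (s.take m)
    (PySem.Dict.mk (aM0 ++ bM1)) ("" ++ "0") le_rfl hnea hnda
    (by rw [mk_keys, List.map_append, haM0k, hbM1k, hsplit]; exact hsnd)
    (by
      intro k hk
      rw [get?_eq_pvLook]
      show pvLook k (aM0 ++ bM1) = some ("" ++ "0")
      exact hlookA k hk)
  rw [hIa, ← hLA]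
  have hIb := construir_eq (s.drop m).length (s.drop m)
    (PySem.Dict.mk (pvApply LA (aM0 ++ bM1))) ("" ++ "1") le_rfl hneb hndb
    (by rw [mk_keys, pvApply_keys, List.map_append, haM0k, hbM1k, hsplit]; exact hsnd)
    (by
      intro k hk
      rw [get?_eq_pvLook]
      show pvLook k (pvApply LA (aM0 ++ bM1)) = some ("" ++ "1")
      rw [pvLook_pvApply,
        pvLook_eq_none k LA (by rw [hLAk]; exact fun hmem => hdisj k hmem hk),
        hlookB k hk]
      rfl)
  rw [hIb, ← hLB]
  rw [pvApply_comp_disjoint LA LB _ (by rw [hLAk, hLBk]; exact hdisj)]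
  rw [pvApply_append_arg]
  have e1 : pvApply (LA ++ LB) aM0 = pvApply LA aM0 := by
    refine pvApply_congr_keys _ _ _ fun k hk => ?_
    rw [haM0k] at hk
    rw [pvLook_append]
    cases hLa : pvLook k LA with
    | some w => rfl
    | none => exact absurd hLa (pvLook_ne_none k LA (by rw [hLAk]; exact hk))
  have e2 : pvApply LA aM0 = LA := by
    rw [show aM0 = (LA.map Prod.fst).map (fun k => (k, "0")) by rw [hLAk]]
    exact pvApply_reconstruct LA "0" (by rw [hLAk]; exact hnda)
  have e3 : pvApply (LA ++ LB) bM1 = pvApply LB bM1 := by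
    refine pvApply_congr_keys _ _ _ fun k hk => ?_
    rw [hbM1k] at hk
    rw [pvLook_append,
      pvLook_eq_none k LA (by rw [hLAk]; exact fun hmem => hdisj k hmem hk)]
    rfl
  have e4 : pvApply LB bM1 = LB := by
    rw [show bM1 = (LB.map Prod.fst).map (fun k => (k, "1")) by rw [hLBk]]
    exact pvApply_reconstruct LB "1" (by rw [hLBk]; exact hndb)
  rw [e1, e2, e3, e4]

-- B's insertion loop over enumerate: all keys fresh, so items is plain accumulation
theorem foldl_insert_enum (f : Int × String → String) (l : List (Int × String))
    (d : PySem.Dict String String)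
    (hnd : (l.map (·.2)).Nodup) (hfr : ∀ q ∈ l, d.contains q.2 = false) :
    (l.foldl (fun t q => t.insert q.2 (f q)) d).items =
      d.items ++ l.map (fun q => (q.2, f q)) := by
  induction l generalizing d with
  | nil => simp
  | cons q l ihl =>
    simp only [List.map_cons, List.nodup_cons] at hnd
    have hc : d.contains q.2 = false := hfr q (List.mem_cons_self ..)
    simp only [List.foldl_cons]
    rw [ihl (d.insert q.2 (f q)) hnd.2
      (fun r hr => by
        rw [PySem.Dict.contains_insert]
        have hrq : (r.2 == q.2) = false := by
          simp only [beq_eq_false_iff_ne, ne_eq]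
          exact fun h => hnd.1 (h ▸ List.mem_map_of_mem hr)
        rw [hrq, hfr r (List.mem_cons_of_mem _ hr)]; rfl)]
    rw [PySem.Dict.items_insert_of_not_contains d _ hc]
    simp

-- ===== VERDICT (by name: the statement is the Claim_ definition above) =====
theorem criar_tabela_spec : Claim_equal_criar_tabela := by
  intro ps _hdom hpre
  show (criar_tabela ps) = criar_tabela_alt ps
  rw [criar_tabela, criar_tabela_alt]
  set d := PySem.Dict.ofList ps with hd
  set s := PySem.List.sorted d.keys (fun simbolo => d.getD simbolo 0) true with hs
  have hknd : d.keys.Nodup := PySem.Dict.nodup_keys_ofList ps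
  have hsnd : s.Nodup := (PySem.List.sorted_perm d.keys _ true).symm.nodup hknd
  have hsne : s ≠ [] := by
    intro h
    apply keys_ofList_ne_nil ps hpre
    have hlen := PySem.List.length_sorted d.keys (fun simbolo => d.getD simbolo 0) true
    rw [← hs, h] at hlen
    exact List.eq_nil_of_length_eq_zero hlen.symm
  by_cases h1 : s.length = 1
  · rw [if_pos h1, construir_tabela, dif_pos h1]
    rfl
  · rw [if_neg h1]
    have hl0 : s.length ≠ 0 := fun h => hsne (List.eq_nil_of_length_eq_zero h)
    have h2 : 2 ≤ s.length := by omega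
    -- A's side: the recursive splitter produces pvCodes s ""
    have hA : (construir_tabela s PySem.Dict.empty).items = pvCodes s "" :=
      construir_top s hsnd hsne h1
    -- B's side: the insertion loop accumulates the per-index bit paths
    have hB : ((PySem.List.enumerate s).foldl
        (fun t q => t.insert q.2 (PySem.Str.join "" (bitsOf 0 (s.length : Int) q.1)))
        PySem.Dict.empty).items =
        (PySem.List.enumerate s).map
          (fun q => (q.2, PySem.Str.join "" (bitsOf 0 (s.length : Int) q.1))) := by
      rw [foldl_insert_enum (fun q => PySem.Str.join "" (bitsOf 0 (s.length : Int) q.1))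
        (PySem.List.enumerate s) PySem.Dict.empty
        (by rw [PySem.List.map_snd_enumerate]; exact hsnd)
        (fun q _ => PySem.Dict.contains_empty q.2)]
      rfl
    rw [hA, hB]
    rw [pvCodes_eq_map s.length s "" 0 (s.length : Int) le_rfl (by omega) hsne (Or.inr h2)]
    refine List.map_congr_left fun q _ => ?_
    simp
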